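-- pv_equiv track=rewrite | github.com/gboxo/bioagent_eval | examples/react_demo/analyze_task_dependencies.py | map_commands_to_packages
-- ===== SOURCE A (Python) =====
-- from typing import Dict, List, Set, Any
--
-- def map_commands_to_packages(commands: Set[str]) -> List[str]:
--     """Map system commands to apt packages."""
--     command_mapping = {
--         'mafft': 'mafft',
--         'fpocket': 'fpocket',
--         'mkdssp': 'dssp',
--         'dssp': 'dssp',
--         'blast': 'blast2',
--         'blastp': 'blast2',
--         'blastn': 'blast2',
--         'blastx': 'blast2',
--         'clustalw': 'clustalw',
--         'muscle': 'muscle'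
--     }
--
--     packages = []
--     for cmd in commands:
--         if cmd in command_mapping:
--             packages.append(command_mapping[cmd])
--
--     return sorted(list(set(packages)))
-- ===== SOURCE B (Python) =====
-- def map_commands_to_packages(commands):
--     """Map system commands to apt packages (reverse index: packages pre-sorted, each with its commands)."""
--     package_index = [
--         ('blast2', ('blast', 'blastp', 'blastn', 'blastx')),
--         ('clustalw', ('clustalw',)),
--         ('dssp', ('mkdssp', 'dssp')),
--         ('fpocket', ('fpocket',)),
--         ('mafft', ('mafft',)),
--         ('muscle', ('muscle',)),
--     ]
--     cmds = set(commands)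
--     return [pkg for pkg, cs in package_index if not cmds.isdisjoint(cs)]
-- ===== Notes on version B (the rewrite author's own statement) =====
-- stated objective: alternative
-- what changed: B replaces A's scan-input-then-dedupe-then-sort pipeline with a precomputed reverse index: a fixed list of packages in sorted order, each paired with the commands that yield it; B filters that list by disjointness against the input set, so no sort and no dedup step exist at all.
import Mathlib
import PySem

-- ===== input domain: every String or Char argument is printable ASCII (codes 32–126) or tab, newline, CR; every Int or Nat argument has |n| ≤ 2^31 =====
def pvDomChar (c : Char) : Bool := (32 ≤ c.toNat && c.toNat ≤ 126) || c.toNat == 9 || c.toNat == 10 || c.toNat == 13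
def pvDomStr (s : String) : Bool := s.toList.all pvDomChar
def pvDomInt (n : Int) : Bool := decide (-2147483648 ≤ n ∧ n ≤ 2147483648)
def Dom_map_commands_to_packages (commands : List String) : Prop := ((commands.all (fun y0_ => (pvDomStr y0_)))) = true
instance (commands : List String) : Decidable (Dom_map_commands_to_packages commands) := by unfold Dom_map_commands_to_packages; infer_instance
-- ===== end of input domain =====

-- B replaces A's scan/dedupe/sort pipeline by a precomputed reverse index (packages pre-sorted, each with its commands) filtered by disjointness against the input set. Objective: alternative.

-- ===== PORT A =====
def pvCommandMappingA : PySem.Dict String String :=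
  PySem.Dict.ofList [("mafft","mafft"),("fpocket","fpocket"),("mkdssp","dssp"),("dssp","dssp"),
    ("blast","blast2"),("blastp","blast2"),("blastn","blast2"),("blastx","blast2"),
    ("clustalw","clustalw"),("muscle","muscle")]

def map_commands_to_packages (commands : List String) : List String :=
  let packages := commands.foldl (fun acc cmd =>
      if pvCommandMappingA.contains cmd then acc ++ [pvCommandMappingA.getD cmd ""] else acc) []
  PySem.List.sorted (PySem.Set.ofList packages) (fun x => x) false

-- ===== PORT B =====
def pvPackageIndexB : List (String × List String) :=
  [("blast2", ["blast", "blastp", "blastn", "blastx"]),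
   ("clustalw", ["clustalw"]),
   ("dssp", ["mkdssp", "dssp"]),
   ("fpocket", ["fpocket"]),
   ("mafft", ["mafft"]),
   ("muscle", ["muscle"])]

def map_commands_to_packages_alt (commands : List String) : List String :=
  let cmds : PySem.Set String := PySem.Set.ofList commands
  (pvPackageIndexB.filter (fun e => !(PySem.Set.isdisjoint cmds e.2))).map Prod.fst

-- ===== PRECONDITION & SPEC =====
def Spec_map_commands_to_packages (commands : List String) (out : List String) : Prop := out = map_commands_to_packages_alt commands
instance (commands : List String) (out : List String) : Decidable (Spec_map_commands_to_packages commands out) := by unfold Spec_map_commands_to_packages; infer_instance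

-- ===== CLAIM (what is proved, stated in full; the proofs are below) =====
def Claim_equal_map_commands_to_packages : Prop := ∀ (commands : List String), Dom_map_commands_to_packages commands → Spec_map_commands_to_packages commands (map_commands_to_packages commands)

-- ===== LEMMAS AND PROOFS =====

-- the forward table and the reverse index describe the same relation
theorem pvTables (c p : String) :
    pvCommandMappingA.get? c = some p ↔ ∃ e ∈ pvPackageIndexB, c ∈ e.2 ∧ e.1 = p := by
  have h : pvCommandMappingA.items =
      [("mafft","mafft"),("fpocket","fpocket"),("mkdssp","dssp"),("dssp","dssp"),
       ("blast","blast2"),("blastp","blast2"),("blastn","blast2"),("blastx","blast2"),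
       ("clustalw","clustalw"),("muscle","muscle")] := by decide
  rw [PySem.Dict.get?_eq_some_iff_mem_items _ _ _ (by decide), h]
  simp only [pvPackageIndexB, List.mem_cons, List.not_mem_nil, or_false, Prod.mk.injEq]
  constructor
  · rintro (⟨hc,hp⟩|⟨hc,hp⟩|⟨hc,hp⟩|⟨hc,hp⟩|⟨hc,hp⟩|⟨hc,hp⟩|⟨hc,hp⟩|⟨hc,hp⟩|⟨hc,hp⟩|⟨hc,hp⟩) <;>
      subst hc <;> subst hp <;>
      first
      | exact ⟨("blast2", ["blast","blastp","blastn","blastx"]), by tauto, by simp, rfl⟩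
      | exact ⟨("clustalw", ["clustalw"]), by tauto, by simp, rfl⟩
      | exact ⟨("dssp", ["mkdssp","dssp"]), by tauto, by simp, rfl⟩
      | exact ⟨("fpocket", ["fpocket"]), by tauto, by simp, rfl⟩
      | exact ⟨("mafft", ["mafft"]), by tauto, by simp, rfl⟩
      | exact ⟨("muscle", ["muscle"]), by tauto, by simp, rfl⟩
  · rintro ⟨e, (he|he|he|he|he|he), hc, hp⟩ <;> subst he <;> subst hp <;>
      simp only [List.mem_cons, List.not_mem_nil, or_false] at hc <;>
      simp_all

-- the reverse index projects to a strictly increasing, duplicate-free package list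
theorem pvFstB : pvPackageIndexB.map Prod.fst =
    ["blast2", "clustalw", "dssp", "fpocket", "mafft", "muscle"] := rfl

-- membership in A's collected package list
theorem pvMemA (commands : List String) (p : String) :
    (p ∈ commands.foldl (fun acc cmd =>
        if pvCommandMappingA.contains cmd then acc ++ [pvCommandMappingA.getD cmd ""] else acc) [])
      ↔ ∃ c ∈ commands, pvCommandMappingA.get? c = some p := by
  rw [PySem.List.foldl_append_if]
  simp only [List.nil_append, List.mem_map, List.mem_filter]
  constructor
  · rintro ⟨c, ⟨hc, hcont⟩, hp⟩
    have hsome : (pvCommandMappingA.get? c).isSome := by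
      rw [← PySem.Dict.contains_eq_isSome_get?]; exact hcont
    obtain ⟨v, hv⟩ := Option.isSome_iff_exists.mp hsome
    refine ⟨c, hc, ?_⟩
    have : v = p := by rw [← hp, PySem.Dict.getD_eq_get?_getD, hv]; rfl
    exact this ▸ hv
  · rintro ⟨c, hc, hv⟩
    refine ⟨c, ⟨hc, ?_⟩, ?_⟩
    · rw [PySem.Dict.contains_eq_isSome_get?, hv]; rfl
    · rw [PySem.Dict.getD_eq_get?_getD, hv]; rfl

-- ===== VERDICT (by name: the statement is the Claim_ definition above) =====
theorem map_commands_to_packages_spec : Claim_equal_map_commands_to_packages := by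
  intro commands _
  unfold Spec_map_commands_to_packages map_commands_to_packages map_commands_to_packages_alt
  have hsub : ((pvPackageIndexB.filter
      (fun e => !(PySem.Set.isdisjoint (PySem.Set.ofList commands) e.2))).map Prod.fst).Sublist
      (pvPackageIndexB.map Prod.fst) := List.Sublist.map Prod.fst List.filter_sublist
  apply PySem.List.sorted_eq_of_perm_of_pairwise_lt
  · apply (List.perm_ext_iff_of_nodup ?_ (PySem.Set.nodup_ofList _)).mpr
    · intro p
      rw [PySem.Set.mem_ofList, pvMemA]
      simp only [List.mem_map, List.mem_filter, Bool.not_eq_eq_eq_not, Bool.not_true]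
      constructor
      · rintro ⟨e, ⟨he, hnd⟩, hep⟩
        rw [Bool.eq_false_iff, Ne, PySem.Set.isdisjoint_iff] at hnd
        push Not at hnd
        obtain ⟨c, hcs, hce⟩ := hnd
        exact ⟨c, (PySem.Set.mem_ofList _ _).mp hcs, (pvTables c p).mpr ⟨e, he, hce, hep⟩⟩
      · rintro ⟨c, hc, hv⟩
        obtain ⟨e, he, hce, hep⟩ := (pvTables c p).mp hv
        refine ⟨e, ⟨he, ?_⟩, hep⟩
        rw [Bool.eq_false_iff]
        intro hdisj
        exact (PySem.Set.isdisjoint_iff _ _).mp hdisj c ((PySem.Set.mem_ofList _ _).mpr hc) hce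
    · exact List.Nodup.sublist hsub (pvFstB ▸ (by decide))
  · exact List.Pairwise.sublist hsub (pvFstB ▸ (by simp [String.lt_iff_toList_lt]; decide))
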